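-- pv_equiv track=rewrite | github.com/ansarionline/Data-Orbitron | comp/subplot.py | add_new_row
-- ===== SOURCE A (Python) =====
-- def add_new_row(data, name, type_, row_num, col_num, x, y):
--     # Check if the current row_num and col_num already exist in the data
--     if not any(row['Row'] == str(row_num) and row['Col'] == str(col_num) for row in data):
--         # If not, increment the index
--         highest_index = max(int(row['Index']) for row in data) if data else 0
--         new_index = str(highest_index + 1)
--     else:
--         # Otherwise, use the current highest index (no increment)
--         new_index = str(max(int(row['Index']) for row in data) if data else 0)
--
--     # Add the new row
--     new_row = {
--         "Index": new_index,
--         "ID": str(name),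
--         "Type": str(type_),
--         "Row": str(row_num),
--         "Col": str(col_num),
--         "XData": str(x),
--         "YData": str(y)
--     }
--
--     if not any(trace['ID'] == name for trace in data):
--         data.append(new_row)
--     return new_index
-- ===== SOURCE B (Python) =====
-- def add_new_row(data, name, type_, row_num, col_num, x, y):
--     # Sort-then-head: the highest index is the head of the rows reverse-sorted
--     # by int('Index'); the row/col check is tuple membership in a projected
--     # cell list, folded into the index by boolean arithmetic.
--     by_index = sorted(data, key=lambda r: int(r['Index']), reverse=True)
--     base = int(by_index[0]['Index']) if by_index else 0
--     cells = [(r['Row'], r['Col']) for r in data]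
--     new_index = str(base + ((str(row_num), str(col_num)) not in cells))
--     new_row = {
--         "Index": new_index,
--         "ID": str(name),
--         "Type": str(type_),
--         "Row": str(row_num),
--         "Col": str(col_num),
--         "XData": str(x),
--         "YData": str(y),
--     }
--     if all(r['ID'] != name for r in data):
--         data.append(new_row)
--     return new_index
-- ===== Notes on version B (the rewrite author's own statement) =====
-- stated objective: alternative
-- what changed: Replaces A's branch on an any() row/col scan plus two max()/any() scans by sort-then-head (reverse sort on int(Index) gives the base index), tuple membership in a projected (Row,Col) cell list added to the base by boolean arithmetic, and an all(!=) ID check.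
import Mathlib
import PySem

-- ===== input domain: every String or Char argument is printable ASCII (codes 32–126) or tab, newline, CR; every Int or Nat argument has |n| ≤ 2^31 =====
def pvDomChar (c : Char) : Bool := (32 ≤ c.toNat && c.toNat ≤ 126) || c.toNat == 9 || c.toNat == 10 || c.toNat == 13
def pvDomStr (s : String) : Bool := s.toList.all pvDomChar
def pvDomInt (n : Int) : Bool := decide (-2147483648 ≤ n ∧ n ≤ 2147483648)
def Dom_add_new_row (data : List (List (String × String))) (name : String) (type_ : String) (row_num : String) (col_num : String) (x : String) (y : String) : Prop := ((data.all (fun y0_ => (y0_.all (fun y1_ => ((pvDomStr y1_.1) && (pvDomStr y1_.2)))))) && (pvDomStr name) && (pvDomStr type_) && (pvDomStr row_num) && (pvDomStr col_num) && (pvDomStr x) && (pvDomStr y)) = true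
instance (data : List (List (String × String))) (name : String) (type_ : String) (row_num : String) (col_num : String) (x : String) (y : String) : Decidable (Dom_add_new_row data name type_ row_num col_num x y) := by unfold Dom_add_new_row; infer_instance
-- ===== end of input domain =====

-- B replaces A's max()/any() scans by a reverse sort on int(Index) (head = highest index),
-- tuple membership in a projected cell list, and an all(≠) ID check; equivalence is about the
-- RETURN value only — both Pythons append the same new row to `data` in place.

-- row[k]: first-match lookup in the association list (Python dict access; "" only outside Pre_)
def pvKey (row : List (String × String)) (k : String) : String :=
  (((row.find? (fun p => p.1 == k)).map Prod.snd).getD "")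

-- int(row['Index']) (the default 0 is never used inside Pre_)
def pvIdx (row : List (String × String)) : Int :=
  (PySem.Int.ofStr? (pvKey row "Index")).getD 0

-- ===== PORT A =====
-- A builds new_row and conditionally appends it to `data`; that mutation does not affect
-- the returned string, so the port computes the return value only.
def add_new_row (data : List (List (String × String))) (name : String) (type_ : String) (row_num : String) (col_num : String) (x : String) (y : String) : String :=
  let exists_rc := data.any (fun row => pvKey row "Row" == row_num && pvKey row "Col" == col_num)
  if !exists_rc then
    let highest_index : Int := match data.map pvIdx with
      | [] => 0
      | h :: t => t.foldl max h
    PySem.Int.toStr (highest_index + 1)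
  else
    PySem.Int.toStr (match data.map pvIdx with
      | [] => 0
      | h :: t => t.foldl max h)

-- ===== PORT B =====
def add_new_row_alt (data : List (List (String × String))) (name : String) (type_ : String) (row_num : String) (col_num : String) (x : String) (y : String) : String :=
  let by_index := PySem.List.sorted data (fun r => pvIdx r) true
  let base : Int := match by_index with
    | [] => 0
    | r :: _ => pvIdx r
  let cells := data.map (fun r => (pvKey r "Row", pvKey r "Col"))
  PySem.Int.toStr (base + (if (row_num, col_num) ∈ cells then 0 else 1))

-- ===== PRECONDITION & SPEC =====
-- Pre_ requires every row to carry the keys 'Row', 'Col', 'ID' and an int()-parsable 'Index':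
-- on malformed rows A raises KeyError/ValueError (except for a few rows skipped only by
-- any()-short-circuiting, on which A and B still agree — see the cite in the claim).
def Pre_add_new_row (data : List (List (String × String))) (name : String) (type_ : String) (row_num : String) (col_num : String) (x : String) (y : String) : Prop :=
  ∀ row ∈ data,
    (row.find? (fun p => p.1 == "Row")).isSome ∧
    (row.find? (fun p => p.1 == "Col")).isSome ∧
    (row.find? (fun p => p.1 == "ID")).isSome ∧
    (PySem.Int.ofStr? (pvKey row "Index")).isSome
instance (data : List (List (String × String))) (name : String) (type_ : String) (row_num : String) (col_num : String) (x : String) (y : String) : Decidable (Pre_add_new_row data name type_ row_num col_num x y) := by unfold Pre_add_new_row; infer_instance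

def pvWitness_add_new_row : (List (List (String × String))) × String × String × String × String × String × String :=
  ([[("Index", "1"), ("ID", "a"), ("Row", "0"), ("Col", "0")]], "b", "scatter", "1", "0", "1,2", "3,4")

def Spec_add_new_row (data : List (List (String × String))) (name : String) (type_ : String) (row_num : String) (col_num : String) (x : String) (y : String) (out : String) : Prop := out = add_new_row_alt data name type_ row_num col_num x y
instance (data : List (List (String × String))) (name : String) (type_ : String) (row_num : String) (col_num : String) (x : String) (y : String) (out : String) : Decidable (Spec_add_new_row data name type_ row_num col_num x y out) := by unfold Spec_add_new_row; infer_instance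

-- ===== CLAIM (what is proved, stated in full; the proofs are below) =====
def Claim_equal_add_new_row : Prop := ∀ (data : List (List (String × String))) (name : String) (type_ : String) (row_num : String) (col_num : String) (x : String) (y : String), Dom_add_new_row data name type_ row_num col_num x y → Pre_add_new_row data name type_ row_num col_num x y → Spec_add_new_row data name type_ row_num col_num x y (add_new_row data name type_ row_num col_num x y)

-- ===== LEMMAS AND PROOFS =====

-- the running max is a member of the list …
lemma pvFoldMax_mem : ∀ (t : List Int) (h : Int), t.foldl max h ∈ h :: t := by
  intro t
  induction t with
  | nil => intro h; simp
  | cons b t ih =>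
      intro h
      rcases List.mem_cons.mp (ih (max h b)) with hc | hc
      · rw [List.foldl_cons, hc]
        rcases max_choice h b with hm | hm <;> rw [hm] <;> simp
      · rw [List.foldl_cons]
        exact List.mem_cons.mpr (Or.inr (List.mem_cons.mpr (Or.inr hc)))

-- … and an upper bound of it
lemma pvFoldMax_ub : ∀ (t : List Int) (h a : Int), a ∈ h :: t → a ≤ t.foldl max h := by
  intro t
  induction t with
  | nil => intro h a ha; simp at ha; simp [ha]
  | cons b t ih =>
      intro h a ha
      rw [List.foldl_cons]
      rcases List.mem_cons.mp ha with rfl | ha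
      · exact le_trans (le_max_left a b) (ih _ _ (List.mem_cons_self))
      rcases List.mem_cons.mp ha with rfl | ha
      · exact le_trans (le_max_right h a) (ih _ _ (List.mem_cons_self))
      · exact ih _ _ (List.mem_cons.mpr (Or.inr ha))

-- a member that bounds the list is the running max
lemma pvFoldMax_eq {h : Int} {t : List Int} {m : Int}
    (hm : m ∈ h :: t) (hub : ∀ a ∈ h :: t, a ≤ m) : t.foldl max h = m :=
  le_antisymm (hub _ (pvFoldMax_mem t h)) (pvFoldMax_ub t h m hm)

-- ===== VERDICT (by name: the statement is the Claim_ definition above) =====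
theorem add_new_row_spec : Claim_equal_add_new_row := by
  intro data name type_ row_num col_num x y _ _
  unfold Spec_add_new_row add_new_row add_new_row_alt
  -- the membership test in B is A's row/col any()
  have hmem : ((row_num, col_num) ∈ data.map (fun r => (pvKey r "Row", pvKey r "Col")))
      ↔ data.any (fun row => pvKey row "Row" == row_num && pvKey row "Col" == col_num) = true := by
    simp only [List.mem_map, List.any_eq_true, Bool.and_eq_true, beq_iff_eq, Prod.mk.injEq]
  -- B's sorted head is A's running max
  have hbase : (match PySem.List.sorted data (fun r => pvIdx r) true with
      | [] => (0 : Int)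
      | r :: _ => pvIdx r)
      = (match data.map pvIdx with
         | [] => (0 : Int)
         | h :: t => t.foldl max h) := by
    cases hs : PySem.List.sorted data (fun r => pvIdx r) true with
    | nil =>
        have : data = [] := (PySem.List.sorted_eq_nil_iff _ _ _).mp hs
        simp [this]
    | cons m rest =>
        have hmemm : m ∈ data := by
          have : m ∈ PySem.List.sorted data (fun r => pvIdx r) true := by
            rw [hs]; exact List.mem_cons_self
          exact (PySem.List.mem_sorted _ _ _ _).mp this
        have hub : ∀ r ∈ data, pvIdx r ≤ pvIdx m :=
          PySem.List.key_head_sorted_rev_ge (xs := data) (key := fun r => pvIdx r) hs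
        cases data with
        | nil => simp at hmemm
        | cons d0 dt =>
            have hm' : pvIdx m ∈ pvIdx d0 :: dt.map pvIdx := by
              simpa using List.mem_map_of_mem (f := pvIdx) hmemm
            have hub' : ∀ a ∈ pvIdx d0 :: dt.map pvIdx, a ≤ pvIdx m := by
              intro a ha
              have : a ∈ (d0 :: dt).map pvIdx := by simpa using ha
              rcases List.mem_map.mp this with ⟨r, hr, rfl⟩
              exact hub r hr
            simpa using (pvFoldMax_eq hm' hub').symm
  by_cases hin : (row_num, col_num) ∈ data.map (fun r => (pvKey r "Row", pvKey r "Col"))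
  · have hrc := hmem.mp hin
    simp [hrc, hin, hbase]
  · have hrc : data.any (fun row => pvKey row "Row" == row_num && pvKey row "Col" == col_num) = false := by
      rw [← Bool.not_eq_true]; exact fun h => hin (hmem.mpr h)
    simp [hrc, hin, hbase]
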